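-- pv_equiv track=rewrite | github.com/sangwon5579/Coding_Test_Practice | 프로그래머스/1/76501. 음양 더하기/음양 더하기.py | calcu
-- ===== SOURCE A (Python) =====
-- def calcu(num, boo, leng):
--     answer = 0
--     for i in range(leng):
--         if(boo[i] == True):
--             answer += num[i]
--         else:
--             answer -= num[i]
--     return answer
-- ===== SOURCE B (Python) =====
-- def calcu(num, boo, leng):
--     n = max(leng, 0)
--     pos = sum(num[:n])
--     neg = sum(x for x, b in zip(num[:n], boo[:n]) if b != True)
--     return pos - 2 * neg
-- ===== Notes on version B (the rewrite author's own statement) =====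
-- stated objective: alternative
-- what changed: Replaces the single branching accumulator loop with two differently-shaped passes: a plain sum of the first leng magnitudes via slicing, corrected by subtracting twice the sum of the entries whose flag is not True (zip+filter), with no index arithmetic.
-- outside the precondition, e.g. on calcu([1, 2], [True], 2): A raises IndexError, B returns 3
import Mathlib
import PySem

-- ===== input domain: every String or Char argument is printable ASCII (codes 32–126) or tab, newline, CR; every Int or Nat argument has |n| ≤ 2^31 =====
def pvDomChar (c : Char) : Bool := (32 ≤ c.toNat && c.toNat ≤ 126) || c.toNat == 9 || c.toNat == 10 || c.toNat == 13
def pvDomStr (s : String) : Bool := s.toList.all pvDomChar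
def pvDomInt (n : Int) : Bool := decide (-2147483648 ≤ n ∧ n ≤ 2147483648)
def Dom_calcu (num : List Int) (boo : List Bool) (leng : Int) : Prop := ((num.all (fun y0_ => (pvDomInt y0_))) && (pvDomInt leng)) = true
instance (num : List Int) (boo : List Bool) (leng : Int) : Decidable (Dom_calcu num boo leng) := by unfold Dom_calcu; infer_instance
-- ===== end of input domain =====

-- B: two differently-shaped passes (sum of a slice, minus twice the sum of the not-True-flagged entries of a zipped slice) instead of A's single branching accumulator loop; same cost.

-- ===== PORT A =====
def calcu (num : List Int) (boo : List Bool) (leng : Int) : Int :=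
  (PySem.List.pyRange 0 leng 1).foldl
    (fun answer i =>
      if PySem.List.pyGetD boo i false == true then answer + PySem.List.pyGetD num i 0
      else answer - PySem.List.pyGetD num i 0) 0

-- ===== PORT B =====
def calcu_alt (num : List Int) (boo : List Bool) (leng : Int) : Int :=
  let n := max leng 0
  let pos := (PySem.List.slice num none (some n)).sum
  let neg := ((((PySem.List.slice num none (some n)).zip
                 (PySem.List.slice boo none (some n))).filter
                 (fun p => p.2 != true)).map Prod.fst).sum
  pos - 2 * neg

-- ===== PRECONDITION & SPEC =====
-- Pre_ excludes exactly the inputs where A raises IndexError: some i in range(leng) out of range of num or boo.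
def Pre_calcu (num : List Int) (boo : List Bool) (leng : Int) : Prop :=
  leng ≤ (num.length : Int) ∧ leng ≤ (boo.length : Int)
instance (num : List Int) (boo : List Bool) (leng : Int) : Decidable (Pre_calcu num boo leng) := by unfold Pre_calcu; infer_instance
def pvWitness_calcu : List Int × List Bool × Int := ([3, -1, 4], [true, false, true], 3)
def Spec_calcu (num : List Int) (boo : List Bool) (leng : Int) (out : Int) : Prop := out = calcu_alt num boo leng
instance (num : List Int) (boo : List Bool) (leng : Int) (out : Int) : Decidable (Spec_calcu num boo leng out) := by unfold Spec_calcu; infer_instance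

-- ===== CLAIM (what is proved, stated in full; the proofs are below) =====
def Claim_equal_calcu : Prop := ∀ (num : List Int) (boo : List Bool) (leng : Int), Dom_calcu num boo leng → Pre_calcu num boo leng → Spec_calcu num boo leng (calcu num boo leng)

-- ===== LEMMAS AND PROOFS =====

-- A's loop, indexed over naturals, as a closed sum over the first n entries.
theorem calcu_loop_eq (num : List Int) (boo : List Bool) :
    ∀ (n : Nat), n ≤ num.length → n ≤ boo.length → ∀ (acc : Int),
    (List.range n).foldl
      (fun a k => if boo.getD k false == true then a + num.getD k 0 else a - num.getD k 0) acc
    = acc + (num.take n).sum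
        - 2 * (((((num.take n).zip (boo.take n)).filter (fun p => p.2 != true)).map Prod.fst).sum) := by
  intro n
  induction n with
  | zero => intro _ _ acc; simp
  | succ m ih =>
    intro h1 h2 acc
    have hm1 : m < num.length := by omega
    have hm2 : m < boo.length := by omega
    rw [List.range_succ, List.foldl_append]
    rw [ih (by omega) (by omega)]
    have ht1 : num.take (m+1) = num.take m ++ [num[m]] := by
      rw [List.take_succ]; simp [List.getElem?_eq_getElem hm1]
    have ht2 : boo.take (m+1) = boo.take m ++ [boo[m]] := by
      rw [List.take_succ]; simp [List.getElem?_eq_getElem hm2]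
    have hzip : (num.take (m+1)).zip (boo.take (m+1))
        = (num.take m).zip (boo.take m) ++ [(num[m], boo[m])] := by
      rw [ht1, ht2, List.zip_append (by simp [List.length_take]; omega)]
      simp
    rw [hzip, ht1]
    simp only [List.foldl_cons, List.foldl_nil, List.filter_append, List.map_append,
      List.sum_append, List.sum_append]
    cases hb : boo[m] <;>
      simp [List.getElem?_eq_getElem hm1, List.getElem?_eq_getElem hm2, hb, List.filter] <;> ring

theorem calcu_spec : Claim_equal_calcu := by
  intro num boo leng _ hpre
  obtain ⟨h1, h2⟩ := hpre
  unfold Spec_calcu calcu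
  have hmax : max leng 0 = ((leng.toNat : Int)) := by omega
  have hn1 : leng.toNat ≤ num.length := by omega
  have hn2 : leng.toNat ≤ boo.length := by omega
  simp only [calcu_alt, hmax, PySem.List.slice_to_natCast]
  rw [PySem.List.pyRange_one]
  simp only [Int.sub_zero, List.foldl_map, Int.zero_add]
  have := calcu_loop_eq num boo leng.toNat hn1 hn2 0
  simp only [PySem.List.pyGetD_natCast] at *
  rw [this]
  ring
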